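-- pv_equiv track=rewrite | github.com/ThatGUY12034/LifeBeacon | qr_generator.py | encode_data
-- ===== SOURCE A (Python) =====
-- def encode_data(text):
--     data = text.encode('utf-8')
--     bits = []
--     def add_bits(val,n):
--         for i in range(n-1,-1,-1): bits.append((val>>i)&1)
--     add_bits(0b0100,4)
--     add_bits(len(data),8)
--     for b in data: add_bits(b,8)
--     return bits
-- ===== SOURCE B (Python) =====
-- def encode_data(text):
--     data = text.encode('utf-8')
--     s = format(0b0100, '04b') + format(len(data) & 0xFF, '08b') + ''.join(format(b, '08b') for b in data)
--     return [int(c) for c in s]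
-- ===== Notes on version B (the rewrite author's own statement) =====
-- stated objective: idiomatic
-- what changed: B builds one binary string with format()/join (masking the length to 8 bits explicitly) and parses its characters, instead of shifting bits out one at a time through a nested helper that appends to a shared list.
import Mathlib
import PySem

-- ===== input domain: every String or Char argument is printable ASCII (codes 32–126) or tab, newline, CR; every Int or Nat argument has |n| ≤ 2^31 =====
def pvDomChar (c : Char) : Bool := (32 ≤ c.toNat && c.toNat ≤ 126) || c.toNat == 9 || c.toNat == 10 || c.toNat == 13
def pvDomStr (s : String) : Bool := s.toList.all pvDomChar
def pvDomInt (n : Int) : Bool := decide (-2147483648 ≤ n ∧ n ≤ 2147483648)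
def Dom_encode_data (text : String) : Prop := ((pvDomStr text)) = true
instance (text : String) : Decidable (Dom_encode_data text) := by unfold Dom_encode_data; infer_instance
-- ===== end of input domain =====

-- B builds one binary string with format()/join (length masked to 8 bits) and parses its characters,
-- instead of A's nested helper shifting bits out one at a time into a shared list. Objective: idiomatic.

-- ===== PORT A =====
-- add_bits(val, n): for i in range(n-1,-1,-1): bits.append((val>>i)&1)
-- (i ≥ 0 on every iteration, so 'i.toNat' is exact for Python's 'val >> i')
def pvAddBits (bits : List Int) (val : Int) (n : Int) : List Int :=
  (PySem.List.pyRange (n - 1) (-1) (-1)).foldl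
    (fun bs i => bs ++ [PySem.Int.band (val >>> i.toNat) 1]) bits

-- text.encode('utf-8'): on Dom (ASCII ≤ 126) each byte equals the character's code point — exact there
def encode_data (text : String) : List Int :=
  let data : List Int := text.toList.map (fun c => (c.toNat : Int))
  let bits : List Int := []
  let bits := pvAddBits bits 4 4
  let bits := pvAddBits bits (data.length : Int) 8
  data.foldl (fun bs b => pvAddBits bs b 8) bits

-- ===== PORT B =====
-- format(val, '0{w}b'): exact for 0 ≤ val < 2^w, which holds at every call site of Source B
def pvFmtBin (val : Int) (w : Nat) : List Char :=
  (List.range w).reverse.map (fun i => if PySem.Int.band (val >>> i) 1 = 1 then '1' else '0')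

-- int(c): c is always '0' or '1' here, so code point minus 48 is exact
def encode_data_alt (text : String) : List Int :=
  let data : List Int := text.toList.map (fun c => (c.toNat : Int))
  let s : List Char :=
    pvFmtBin 4 4 ++ pvFmtBin (PySem.Int.band (data.length : Int) 0xFF) 8
      ++ data.flatMap (fun b => pvFmtBin b 8)
  s.map (fun c => ((c.toNat : Int) - 48))

-- ===== PRECONDITION & SPEC =====
def Spec_encode_data (text : String) (out : List Int) : Prop := out = encode_data_alt text
instance (text : String) (out : List Int) : Decidable (Spec_encode_data text out) := by unfold Spec_encode_data; infer_instance

-- ===== CLAIM (what is proved, stated in full; the proofs are below) =====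
def Claim_equal_encode_data : Prop := ∀ (text : String), Dom_encode_data text → Spec_encode_data text (encode_data text)

-- ===== LEMMAS AND PROOFS =====

theorem pvFlatMap_single {a b : Type} (l : List a) (f : a → b) :
    l.flatMap (fun x => [f x]) = l.map f := by
  induction l with
  | nil => rfl
  | cons x xs ih => simp [List.flatMap_cons, ih]

theorem pvAddBits_eq (bits : List Int) (val n : Int) :
    pvAddBits bits val n
      = bits ++ (PySem.List.pyRange (n - 1) (-1) (-1)).map
          (fun i => PySem.Int.band (val >>> i.toNat) 1) := by
  unfold pvAddBits
  rw [PySem.List.foldl_append_eq_flatMap, pvFlatMap_single]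

theorem pvBit_cast (m i : Nat) :
    PySem.Int.band ((m : Int) >>> i) 1 = (((m >>> i) &&& 1 : Nat) : Int) := by
  have hc : ((m : Int) >>> i) = ((m >>> i : Nat) : Int) := Int.mem_toNat?.mp rfl
  rw [hc]; simpa using PySem.Int.band_natCast (m >>> i) 1

theorem pvBit_conv (m i : Nat) :
    ((if PySem.Int.band ((m : Int) >>> i) 1 = 1 then '1' else '0').toNat : Int) - 48
      = PySem.Int.band ((m : Int) >>> i) 1 := by
  rw [pvBit_cast, Nat.and_one_is_mod]
  rcases Nat.mod_two_eq_zero_or_one (m >>> i) with h | h <;> simp [h]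

theorem pvMask_bit (m i : Nat) (h : i < 8) :
    PySem.Int.band (((m &&& 255 : Nat) : Int) >>> i) 1
      = PySem.Int.band ((m : Int) >>> i) 1 := by
  rw [pvBit_cast, pvBit_cast]
  norm_cast
  rw [show (255 : Nat) = 2 ^ 8 - 1 by norm_num, Nat.and_two_pow_sub_one_eq_mod]
  simp only [Nat.shiftRight_eq_div_pow, Nat.and_one_is_mod]
  interval_cases i <;> omega

theorem pvSeg_eq (m : Nat) :
    (pvFmtBin (m : Int) 8).map (fun c => ((c.toNat : Int) - 48))
      = (PySem.List.pyRange 7 (-1) (-1)).map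
          (fun i => PySem.Int.band ((m : Int) >>> i.toNat) 1) := by
  have h2 : PySem.List.pyRange 7 (-1) (-1) = [7, 6, 5, 4, 3, 2, 1, 0] := by decide
  simp only [pvFmtBin, h2, List.range_succ, List.range_zero,
    List.reverse_cons, List.reverse_nil, List.nil_append, List.cons_append,
    List.map_cons, List.map_nil]
  norm_num
  exact ⟨pvBit_conv m 7, pvBit_conv m 6, pvBit_conv m 5, pvBit_conv m 4,
    pvBit_conv m 3, pvBit_conv m 2, pvBit_conv m 1, pvBit_conv m 0⟩

theorem pvSegMask_eq (m : Nat) :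
    (pvFmtBin (PySem.Int.band (m : Int) 255) 8).map (fun c => ((c.toNat : Int) - 48))
      = (PySem.List.pyRange 7 (-1) (-1)).map
          (fun i => PySem.Int.band ((m : Int) >>> i.toNat) 1) := by
  have h255 : PySem.Int.band (m : Int) 255 = ((m &&& 255 : Nat) : Int) := by
    simpa using PySem.Int.band_natCast m 255
  rw [h255, pvSeg_eq (m &&& 255)]
  have h2 : PySem.List.pyRange 7 (-1) (-1) = [7, 6, 5, 4, 3, 2, 1, 0] := by decide
  rw [h2]
  simp only [List.map_cons, List.map_nil]
  norm_num
  exact ⟨pvMask_bit m 7 (by norm_num), pvMask_bit m 6 (by norm_num),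
    pvMask_bit m 5 (by norm_num), pvMask_bit m 4 (by norm_num),
    pvMask_bit m 3 (by norm_num), pvMask_bit m 2 (by norm_num),
    pvMask_bit m 1 (by norm_num), pvMask_bit m 0 (by norm_num)⟩

theorem pvSegHeader_eq :
    (pvFmtBin 4 4).map (fun c => ((c.toNat : Int) - 48))
      = (PySem.List.pyRange 3 (-1) (-1)).map
          (fun i => PySem.Int.band ((4 : Int) >>> i.toNat) 1) := by decide

-- ===== VERDICT (by name: the statement is the Claim_ definition above) =====
theorem encode_data_spec : Claim_equal_encode_data := by
  intro text _
  unfold Spec_encode_data encode_data encode_data_alt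
  simp only [pvAddBits_eq, List.nil_append,
    show ((4 : Int) - 1) = 3 from by norm_num, show ((8 : Int) - 1) = 7 from by norm_num]
  rw [PySem.List.foldl_append_eq_flatMap]
  rw [List.map_append, List.map_append, List.map_flatMap]
  rw [pvSegHeader_eq]
  rw [List.length_map]
  have hlen := pvSegMask_eq text.toList.length
  rw [hlen]
  have hbytes :
      (text.toList.map (fun c => (c.toNat : Int))).flatMap
          (fun b => (pvFmtBin b 8).map (fun c => ((c.toNat : Int) - 48)))
        = (text.toList.map (fun c => (c.toNat : Int))).flatMap
          (fun b => (PySem.List.pyRange 7 (-1) (-1)).map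
              (fun i => PySem.Int.band (b >>> i.toNat) 1)) := by
    rw [List.flatMap_map, List.flatMap_map]
    apply List.flatMap_congr  -- may not exist; fallback below
    intro c _
    exact pvSeg_eq c.toNat
  rw [hbytes]
  simp only [List.append_assoc, Int.shiftRight_natCast_right]
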